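-- pv_equiv track=rewrite | github.com/JosueCastaneda/Multi-Domain-Orchestrators-NFV | experiments/experiment_generator/count_errors_experiment.py | missing_elements
-- ===== SOURCE A (Python) =====
-- def missing_elements(experiment, valid):
--     repeated_missing_elements = []
--     missing_elements_counter = 0
--     for elem in valid:
--         if elem not in experiment:
--             if elem not in repeated_missing_elements:
--                 missing_elements_counter += 1
--                 repeated_missing_elements.append(elem)
--     return missing_elements_counter
-- ===== SOURCE B (Python) =====
-- def missing_elements(experiment, valid):
--     exp = set(experiment)
--     count = 0
--     prev = None
--     for e in sorted(valid):
--         if e != prev and e not in exp: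
--             count += 1
--         prev = e
--     return count
-- ===== Notes on version B (the rewrite author's own statement) =====
-- stated objective: faster
-- what changed: Replaced membership-based dedup (a growing 'seen' list scanned per element, plus list membership in experiment) by sort-then-scan: sort valid once so duplicates are adjacent, then a single pass counting elements that differ from their predecessor and are absent from a prebuilt set of experiment.
import Mathlib
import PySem

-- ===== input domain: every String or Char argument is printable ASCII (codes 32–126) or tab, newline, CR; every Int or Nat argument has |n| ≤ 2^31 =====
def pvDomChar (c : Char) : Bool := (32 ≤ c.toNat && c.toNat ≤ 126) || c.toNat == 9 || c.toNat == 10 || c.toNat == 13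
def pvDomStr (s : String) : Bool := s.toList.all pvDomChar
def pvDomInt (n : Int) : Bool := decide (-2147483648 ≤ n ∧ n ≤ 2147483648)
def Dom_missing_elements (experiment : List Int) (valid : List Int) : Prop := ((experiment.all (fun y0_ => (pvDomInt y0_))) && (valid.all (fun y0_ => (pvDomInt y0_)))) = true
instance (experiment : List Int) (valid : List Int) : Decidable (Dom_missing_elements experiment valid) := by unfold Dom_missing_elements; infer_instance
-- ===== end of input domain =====

-- B replaces A's per-element membership dedup (a growing 'seen' list) by sort-then-scan:
-- sort valid so duplicates are adjacent, then one pass counting elements that differ from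
-- their predecessor and are absent from a prebuilt set of experiment. Same value, different algorithm.

-- ===== PORT A =====
-- loop over valid with state (repeated_missing_elements, missing_elements_counter)
def missing_elements (experiment : List Int) (valid : List Int) : Int :=
  (valid.foldl
    (fun (st : List Int × Int) elem =>
      if !(experiment.contains elem) then
        if !(st.1.contains elem) then (st.1 ++ [elem], st.2 + 1) else st
      else st)
    ([], 0)).2

-- ===== PORT B =====
-- exp = set(experiment); scan sorted(valid) with state (prev : Option Int, count)
def missing_elements_alt (experiment : List Int) (valid : List Int) : Int :=
  let exp := PySem.Set.ofList experiment
  ((PySem.List.sorted valid (fun x => x) false).foldl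
    (fun (st : Option Int × Int) e =>
      (some e, if st.1 != some e && !(exp.contains e) then st.2 + 1 else st.2))
    (none, 0)).2

-- ===== PRECONDITION & SPEC =====
def Spec_missing_elements (experiment : List Int) (valid : List Int) (out : Int) : Prop := out = missing_elements_alt experiment valid
instance (experiment : List Int) (valid : List Int) (out : Int) : Decidable (Spec_missing_elements experiment valid out) := by unfold Spec_missing_elements; infer_instance

-- ===== CLAIM (what is proved, stated in full; the proofs are below) =====
def Claim_equal_missing_elements : Prop := ∀ (experiment : List Int) (valid : List Int), Dom_missing_elements experiment valid → Spec_missing_elements experiment valid (missing_elements experiment valid)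

-- ===== LEMMAS AND PROOFS =====

-- step of A's loop
def pvStepA (experiment : List Int) (st : List Int × Int) (elem : Int) : List Int × Int :=
  if !(experiment.contains elem) then
    if !(st.1.contains elem) then (st.1 ++ [elem], st.2 + 1) else st
  else st

theorem pvFoldA_eq (experiment valid : List Int) (s : List Int) :
    valid.foldl (pvStepA experiment) (s, (s.length : Int)) =
      (PySem.Set.update s (valid.filter (fun x => !(experiment.contains x))),
       ((PySem.Set.update s (valid.filter (fun x => !(experiment.contains x)))).length : Int)) := by
  induction valid generalizing s with
  | nil => simp [PySem.Set.update]
  | cons x xs ih =>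
    rw [List.foldl_cons, List.filter_cons]
    by_cases hx : x ∈ experiment
    · have h1 : pvStepA experiment (s, (s.length : Int)) x = (s, (s.length : Int)) := by
        simp [pvStepA, hx]
      rw [h1, ih s]
      simp [hx]
    · by_cases hs : x ∈ s
      · have h1 : pvStepA experiment (s, (s.length : Int)) x = (s, (s.length : Int)) := by
          simp [pvStepA, hx, hs]
        rw [h1, ih s]
        simp [hx, PySem.Set.update_cons, PySem.Set.add_of_mem hs]
      · have h1 : pvStepA experiment (s, (s.length : Int)) x
            = (s ++ [x], (s.length : Int) + 1) := by
          simp [pvStepA, hx, hs]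
        have h2 : (((s ++ [x]).length : Nat) : Int) = (s.length : Int) + 1 := by simp
        rw [h1, ← h2, ih (s ++ [x])]
        simp [hx, PySem.Set.update_cons, PySem.Set.add_of_not_mem hs]

-- dedup length is the toFinset card
theorem pvOfList_len_toFinset (xs : List Int) :
    ((PySem.Set.ofList xs).length : Int) = (xs.toFinset.card : Int) := by
  have hnd : (PySem.Set.ofList xs).Nodup := by
    rw [← PySem.List.dedup_eq_ofList]; exact PySem.List.nodup_dedup xs
  have hfin : (PySem.Set.ofList xs).toFinset = xs.toFinset := by
    apply Finset.ext; intro a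
    simp [List.mem_toFinset, ← PySem.List.dedup_eq_ofList, PySem.List.mem_dedup]
  rw [← List.toFinset_card_of_nodup hnd, hfin]

-- step of B's loop
def pvStepB (exp : PySem.Set Int) (st : Option Int × Int) (e : Int) : Option Int × Int :=
  (some e, if st.1 != some e && !(exp.contains e) then st.2 + 1 else st.2)

def pvPrevSet (prev : Option Int) : Finset Int := prev.elim ∅ ({·})

-- on a sorted list, the scan counts distinct elements passing the filter (minus the seed prev)
theorem pvFoldB_eq (experiment : List Int) (l : List Int) (hl : l.Pairwise (· ≤ ·))
    (prev : Option Int) (hprev : ∀ v, prev = some v → ∀ y ∈ l, v ≤ y) (c : Int) :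
    (l.foldl (pvStepB (PySem.Set.ofList experiment)) (prev, c)).2 =
      c + ((((l.filter (fun x => !(experiment.contains x))).toFinset) \ pvPrevSet prev).card : Int) := by
  induction l generalizing prev c with
  | nil => simp [pvPrevSet]
  | cons x xs ih =>
    have hx : ∀ y ∈ xs, x ≤ y := fun y hy => (List.pairwise_cons.mp hl).1 y hy
    have hxs : xs.Pairwise (· ≤ ·) := (List.pairwise_cons.mp hl).2
    have hprev' : ∀ v, (some x : Option Int) = some v → ∀ y ∈ xs, v ≤ y := by
      intro v hv y hy; cases hv; exact hx y hy
    rw [List.foldl_cons, List.filter_cons]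
    set S := (xs.filter (fun x => !(experiment.contains x))).toFinset with hS
    have hnotinS : ∀ v, v ≤ x → v ≠ x → v ∉ S := by
      intro v hvle hvx hvS
      rw [hS, List.mem_toFinset, List.mem_filter] at hvS
      have := hx v hvS.1
      omega
    by_cases hmem : x ∈ experiment
    · -- x present in experiment: not counted, filter drops it
      have hstep : pvStepB (PySem.Set.ofList experiment) (prev, c) x = (some x, c) := by
        simp [pvStepB, List.contains_eq_mem, hmem]
      rw [hstep, ih hxs (some x) hprev' c]
      have hxS : x ∉ S := by
        intro h; rw [hS, List.mem_toFinset, List.mem_filter] at h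
        simp [List.contains_eq_mem, hmem] at h
      have h1 : S \ pvPrevSet (some x) = S := by
        simp [pvPrevSet, Finset.sdiff_singleton_eq_erase, Finset.erase_eq_of_notMem hxS]
      have h2 : S \ pvPrevSet prev = S := by
        cases prev with
        | none => simp [pvPrevSet]
        | some v =>
          by_cases hvx : v = x
          · subst hvx
            simp [pvPrevSet, Finset.sdiff_singleton_eq_erase, Finset.erase_eq_of_notMem hxS]
          · have hvS : v ∉ S := hnotinS v (hprev v rfl x (by simp)) hvx
            simp [pvPrevSet, Finset.sdiff_singleton_eq_erase, Finset.erase_eq_of_notMem hvS]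
      have hpred : (!(experiment.contains x)) = false := by
        simp [List.contains_eq_mem, hmem]
      simp only [hpred, Bool.false_eq_true, if_false]
      rw [h1, h2]
    · -- x missing from experiment: filter keeps it
      have hkeep : (!(experiment.contains x)) = true := by
        simp [List.contains_eq_mem, hmem]
      simp only [hkeep, if_true]
      have hT : (x :: xs.filter (fun x => !(experiment.contains x))).toFinset = insert x S := by
        simp [hS]
      rw [hT]
      by_cases hpv : prev = some x
      · -- duplicate of prev: not counted
        have hstep : pvStepB (PySem.Set.ofList experiment) (prev, c) x = (some x, c) := by
          simp [pvStepB, hpv]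
        rw [hstep, ih hxs (some x) hprev' c]
        subst hpv
        simp [pvPrevSet, Finset.sdiff_singleton_eq_erase, Finset.erase_insert_eq_erase]
      · -- new value: counted
        have hstep : pvStepB (PySem.Set.ofList experiment) (prev, c) x = (some x, c + 1) := by
          simp [pvStepB, List.contains_eq_mem, hmem, hpv]
        rw [hstep, ih hxs (some x) hprev' (c + 1)]
        have hdrop : insert x S \ pvPrevSet prev = insert x S := by
          cases prev with
          | none => simp [pvPrevSet]
          | some v =>
            have hvx : v ≠ x := fun h => hpv (by rw [h])
            have hvS : v ∉ S := hnotinS v (hprev v rfl x (by simp)) hvx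
            have hv' : v ∉ insert x S := by
              simp only [Finset.mem_insert]
              rintro (h | h)
              · exact hvx h
              · exact hvS h
            simp [pvPrevSet, Finset.sdiff_singleton_eq_erase, Finset.erase_eq_of_notMem hv']
        have hcard : (insert x S).card = (S.erase x).card + 1 := by
          by_cases hxS : x ∈ S
          · rw [Finset.insert_eq_self.mpr hxS]
            have := Finset.card_erase_add_one hxS
            omega
          · rw [Finset.card_insert_of_notMem hxS, Finset.erase_eq_of_notMem hxS]
        rw [hdrop]
        simp only [pvPrevSet, Option.elim, Finset.sdiff_singleton_eq_erase, hcard]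
        push_cast
        ring

theorem pvUpdate_nil (l : List Int) : PySem.Set.update [] l = PySem.Set.ofList l := by
  simp [PySem.Set.update, PySem.Set.ofList_eq_foldl]

-- ===== VERDICT (by name: the statement is the Claim_ definition above) =====
theorem missing_elements_spec : Claim_equal_missing_elements := by
  intro experiment valid _
  unfold Spec_missing_elements missing_elements missing_elements_alt
  have hA := pvFoldA_eq experiment valid []
  simp only [List.length_nil, Int.natCast_zero] at hA
  show (valid.foldl (pvStepA experiment) ([], 0)).2
      = ((PySem.List.sorted valid (fun x => x) false).foldl
          (pvStepB (PySem.Set.ofList experiment)) (none, 0)).2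
  rw [hA, pvUpdate_nil]
  have hl : (PySem.List.sorted valid (fun x => x) false).Pairwise (· ≤ ·) :=
    PySem.List.sorted_pairwise valid (fun x => x)
  rw [pvFoldB_eq experiment _ hl none (fun v hv => by cases hv) 0]
  have hperm : ((PySem.List.sorted valid (fun x => x) false).filter
      (fun x => !(experiment.contains x))).Perm
      (valid.filter (fun x => !(experiment.contains x))) :=
    (PySem.List.sorted_perm valid (fun x => x) false).filter _
  show ((PySem.Set.ofList (valid.filter (fun x => !(experiment.contains x)))).length : Int) = _
  rw [pvOfList_len_toFinset, ← List.toFinset_eq_of_perm _ _ hperm]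
  simp [pvPrevSet]
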